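-- pv_equiv track=rewrite | github.com/Cvillas91/myPython | codeWars/6kyu.py | is_language_diverse
-- ===== SOURCE A (Python) =====
-- def is_language_diverse(lst):
--     fin = []
--     for el in lst:
--         fin.append(el['language'])
--     js, rb, py = 0, 0, 0
--     js = fin.count("JavaScript")
--     rb = fin.count("Ruby")
--     py = fin.count("Python")
--     if min(js, rb, py) * 2 < max(js, rb, py):
--         return False
--     return True
-- ===== SOURCE B (Python) =====
-- def is_language_diverse(lst):
--     def go(rest, js, rb, py):
--         if not rest:
--             return min(js, rb, py) * 2 >= max(js, rb, py)
--         lang = rest[0]['language']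
--         return go(rest[1:],
--                   js + (lang == "JavaScript"),
--                   rb + (lang == "Ruby"),
--                   py + (lang == "Python"))
--     return go(lst, 0, 0, 0)
-- ===== Notes on version B (the rewrite author's own statement) =====
-- stated objective: alternative
-- what changed: B is a single recursive pass carrying three integer accumulators that are incremented per element, replacing A's staged computation (build an intermediate list of all languages, then three separate .count scans over it) with no container at all; the final test is the inverted comparison min*2 >= max.
import Mathlib
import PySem

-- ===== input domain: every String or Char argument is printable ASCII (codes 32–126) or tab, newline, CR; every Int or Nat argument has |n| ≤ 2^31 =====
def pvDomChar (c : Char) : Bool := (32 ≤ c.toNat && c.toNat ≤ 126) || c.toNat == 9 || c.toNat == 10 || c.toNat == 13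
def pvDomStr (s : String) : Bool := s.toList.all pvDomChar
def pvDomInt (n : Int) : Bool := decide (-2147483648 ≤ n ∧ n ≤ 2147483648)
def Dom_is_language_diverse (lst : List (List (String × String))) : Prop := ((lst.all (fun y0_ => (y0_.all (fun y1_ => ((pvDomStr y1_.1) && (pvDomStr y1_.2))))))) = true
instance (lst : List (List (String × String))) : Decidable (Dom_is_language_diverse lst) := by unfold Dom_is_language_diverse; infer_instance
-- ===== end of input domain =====

-- B replaces A's staged passes (intermediate list + three .count scans) by one recursive pass with three integer accumulators (alternative decomposition, same cost).

-- ===== PORT A =====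
-- el['language'] raises KeyError when the key is absent; under Pre_ the key is present, so getD's default is never returned.
def is_language_diverse (lst : List (List (String × String))) : Bool :=
  let fin := lst.foldl (fun acc el => acc ++ [(PySem.Dict.mk el).getD "language" ""]) []
  let js := PySem.List.count fin "JavaScript"
  let rb := PySem.List.count fin "Ruby"
  let py := PySem.List.count fin "Python"
  if min js (min rb py) * 2 < max js (max rb py) then false else true

-- ===== PORT B =====
def is_language_diverse_go : List (List (String × String)) → Int → Int → Int → Bool
  | [], js, rb, py => decide (min js (min rb py) * 2 ≥ max js (max rb py))
  | el :: rest, js, rb, py =>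
      let lang := (PySem.Dict.mk el).getD "language" ""
      is_language_diverse_go rest
        (js + if lang = "JavaScript" then 1 else 0)
        (rb + if lang = "Ruby" then 1 else 0)
        (py + if lang = "Python" then 1 else 0)

def is_language_diverse_alt (lst : List (List (String × String))) : Bool :=
  is_language_diverse_go lst 0 0 0

-- ===== PRECONDITION & SPEC =====
-- Pre_ excludes only the inputs where some element lacks the key 'language', on which A raises KeyError.
def Pre_is_language_diverse (lst : List (List (String × String))) : Prop :=
  (lst.all (fun el => el.any (fun p => p.1 == "language"))) = true
instance (lst : List (List (String × String))) : Decidable (Pre_is_language_diverse lst) := by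
  unfold Pre_is_language_diverse; infer_instance
def pvWitness_is_language_diverse : (List (List (String × String))) :=
  [[("language", "Ruby")], [("language", "Python")], [("language", "JavaScript")]]

def Spec_is_language_diverse (lst : List (List (String × String))) (out : Bool) : Prop := out = is_language_diverse_alt lst
instance (lst : List (List (String × String))) (out : Bool) : Decidable (Spec_is_language_diverse lst out) := by unfold Spec_is_language_diverse; infer_instance

-- ===== CLAIM (what is proved, stated in full; the proofs are below) =====
def Claim_equal_is_language_diverse : Prop := ∀ (lst : List (List (String × String))), Dom_is_language_diverse lst → Pre_is_language_diverse lst → Spec_is_language_diverse lst (is_language_diverse lst)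

-- ===== LEMMAS AND PROOFS =====

theorem go_eq (lst : List (List (String × String))) (js rb py : Int) :
    is_language_diverse_go lst js rb py
    = decide (min (js + ((lst.map (fun el => (PySem.Dict.mk el).getD "language" "")).count "JavaScript" : Int))
                  (min (rb + ((lst.map (fun el => (PySem.Dict.mk el).getD "language" "")).count "Ruby" : Int))
                       (py + ((lst.map (fun el => (PySem.Dict.mk el).getD "language" "")).count "Python" : Int))) * 2
              ≥ max (js + ((lst.map (fun el => (PySem.Dict.mk el).getD "language" "")).count "JavaScript" : Int))
                    (max (rb + ((lst.map (fun el => (PySem.Dict.mk el).getD "language" "")).count "Ruby" : Int))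
                         (py + ((lst.map (fun el => (PySem.Dict.mk el).getD "language" "")).count "Python" : Int)))) := by
  induction lst generalizing js rb py with
  | nil => simp [is_language_diverse_go]
  | cons el tl ih =>
    have key : ∀ (x : Int) (s : String),
        x + (((el :: tl).map (fun e => (PySem.Dict.mk e).getD "language" "")).count s : Int)
        = (x + if (PySem.Dict.mk el).getD "language" "" = s then 1 else 0)
            + ((tl.map (fun e => (PySem.Dict.mk e).getD "language" "")).count s : Int) := by
      intro x s
      simp only [List.map_cons, List.count_cons]
      by_cases h : (PySem.Dict.mk el).getD "language" "" = s
      · simp [h]; ring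
      · simp [h]
    rw [key, key, key]
    simp only [is_language_diverse_go, ih]

-- ===== VERDICT (by name: the statement is the Claim_ definition above) =====
theorem is_language_diverse_spec : Claim_equal_is_language_diverse := by
  intro lst _ _
  unfold Spec_is_language_diverse is_language_diverse is_language_diverse_alt
  rw [go_eq]
  simp only [PySem.List.foldl_append_singleton_eq_map, List.nil_append, PySem.List.count_eq,
    zero_add]
  set cj := (lst.map (fun el => (PySem.Dict.mk el).getD "language" "")).count "JavaScript" with hj
  set cr := (lst.map (fun el => (PySem.Dict.mk el).getD "language" "")).count "Ruby" with hr
  set cp := (lst.map (fun el => (PySem.Dict.mk el).getD "language" "")).count "Python" with hp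
  by_cases h : min cj (min cr cp) * 2 < max cj (max cr cp)
  · rw [if_pos h]; symm; rw [decide_eq_false_iff_not]; omega
  · rw [if_neg h]; symm; rw [decide_eq_true_eq]; omega
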